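-- pv_equiv track=rewrite | github.com/core-harshit/core-harshit | Coding/alternatesorting.py | alternatingSort
-- ===== SOURCE A (Python) =====
-- def alternatingSort(a):
--     b=[]
--     c=0
--     if len(a)%2==0:
--         for c in range(len(a)//2):
--             b.append(a[c])
--             b.append(a[-c-1])
--
--         if len(b)!=len(set(b)):
--             return False
--         else:
--             if b==sorted(b):
--                 return True
--             else:
--                 return False
--     else:
--         for c in range(len(a)):
--             b.append(a[c])
--             b.append(a[-c-1])
--             del b[len(a)::]
--         if len(b)!=len(set(b)):
--             return False
--         else:
--             if b==sorted(b):
--                 return True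
--             else:
--                 return False
-- ===== SOURCE B (Python) =====
-- def alternatingSort(a):
--     # One linear pass with two pointers: take elements alternately from the
--     # front and the back and check the sequence is strictly increasing.
--     i, j = 0, len(a) - 1
--     prev = None
--     front = True
--     while i <= j:
--         x = a[i] if front else a[j]
--         if front:
--             i += 1
--         else:
--             j -= 1
--         if prev is not None and x <= prev:
--             return False
--         prev = x
--         front = not front
--     return True
-- ===== Notes on version B (the rewrite author's own statement) =====
-- stated objective: faster
-- what changed: Instead of materialising the front/back interleaving and checking it via a duplicate set and a full sort, B walks the list once with two pointers and verifies strict increase on the fly, short-circuiting at the first violation.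
import Mathlib
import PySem

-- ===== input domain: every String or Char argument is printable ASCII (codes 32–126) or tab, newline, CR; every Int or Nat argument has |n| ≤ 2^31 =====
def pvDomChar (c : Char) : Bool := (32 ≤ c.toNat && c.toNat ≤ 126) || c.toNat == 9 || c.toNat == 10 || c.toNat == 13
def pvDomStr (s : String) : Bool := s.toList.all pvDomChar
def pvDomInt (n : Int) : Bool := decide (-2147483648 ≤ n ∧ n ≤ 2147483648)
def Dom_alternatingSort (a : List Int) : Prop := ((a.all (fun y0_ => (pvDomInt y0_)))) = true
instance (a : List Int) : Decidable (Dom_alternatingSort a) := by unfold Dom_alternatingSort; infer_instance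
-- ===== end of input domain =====

-- B replaces A's "build the front/back interleaving, then check duplicates via set() and order via sorted()"
-- by a single two-pointer pass that checks strict increase directly (no sort, short-circuits).


-- ===== PORT A =====
-- the final check shared by both branches of A:
-- "if len(b)!=len(set(b)): return False; if b==sorted(b): return True; return False"
def pvCheck (b : List Int) : Bool :=
  if b.length != (PySem.Set.ofList b).length then false
  else if b == PySem.List.sorted b (fun x => x) false then true else false

def alternatingSort (a : List Int) : Bool :=
  let n : Int := a.length
  if n % 2 == 0 then
    -- for c in range(len(a)//2): b.append(a[c]); b.append(a[-c-1])
    let b := (PySem.List.pyRange 0 (PySem.Int.floordiv n 2) 1).foldl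
      (fun b c => b ++ [PySem.List.pyGetD a c 0, PySem.List.pyGetD a (-c - 1) 0]) []
    pvCheck b
  else
    -- for c in range(len(a)): b.append(a[c]); b.append(a[-c-1]); del b[len(a)::]
    let b := (PySem.List.pyRange 0 n 1).foldl
      (fun b c => ((b ++ [PySem.List.pyGetD a c 0, PySem.List.pyGetD a (-c - 1) 0]).take a.length)) []
    pvCheck b

-- ===== PORT B =====
-- B's while-loop: i/j two pointers, prev the last taken element, front which end is next
def altLoop (a : List Int) (i j : Int) (prev : Option Int) (front : Bool) : Bool :=
  if h : i ≤ j then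
    let x := if front then PySem.List.pyGetD a i 0 else PySem.List.pyGetD a j 0
    let i' := if front then i + 1 else i
    let j' := if front then j else j - 1
    match prev with
    | some p => if x ≤ p then false else altLoop a i' j' (some x) (!front)
    | none => altLoop a i' j' (some x) (!front)
  else true
termination_by (j + 1 - i).toNat
decreasing_by all_goals cases front <;> simp_all <;> omega

def alternatingSort_alt (a : List Int) : Bool :=
  altLoop a 0 ((a.length : Int) - 1) none true

-- ===== PRECONDITION & SPEC =====
def Spec_alternatingSort (a : List Int) (out : Bool) : Prop := out = alternatingSort_alt a
instance (a : List Int) (out : Bool) : Decidable (Spec_alternatingSort a out) := by unfold Spec_alternatingSort; infer_instance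

-- ===== CLAIM (what is proved, stated in full; the proofs are below) =====
def Claim_equal_alternatingSort : Prop := ∀ (a : List Int), Dom_alternatingSort a → Spec_alternatingSort a (alternatingSort a)

-- ===== LEMMAS AND PROOFS =====

-- the sequence of elements B's loop inspects, taken alternately front/back
def pvSeq (a : List Int) (i j : Int) (front : Bool) : List Int :=
  if h : i ≤ j then
    (if front then PySem.List.pyGetD a i 0 else PySem.List.pyGetD a j 0) ::
      pvSeq a (if front then i + 1 else i) (if front then j else j - 1) (!front)
  else []
termination_by (j + 1 - i).toNat
decreasing_by cases front <;> simp_all <;> omega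

-- "strictly increasing after prev" as a boolean fold
def pvChain : Option Int → List Int → Bool
  | _, [] => true
  | none, x :: rest => pvChain (some x) rest
  | some p, x :: rest => decide (p < x) && pvChain (some x) rest

theorem altLoop_eq (a : List Int) (i j : Int) (prev : Option Int) (front : Bool) :
    altLoop a i j prev front = pvChain prev (pvSeq a i j front) := by
  fun_induction altLoop a i j prev front
  case case1 i j front h x p hle =>
    rw [pvSeq, dif_pos h]
    cases front
    · have hle' : PySem.List.pyGetD a j 0 ≤ p := hle
      simp [pvChain, not_lt.mpr hle']
    · have hle' : PySem.List.pyGetD a i 0 ≤ p := hle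
      simp [pvChain, not_lt.mpr hle']
  case case2 i j front h x i' j' p hle ih =>
    rw [pvSeq, dif_pos h, ih]
    cases front
    · have hlt : p < PySem.List.pyGetD a j 0 := not_le.mp hle
      simp [pvChain, hlt]
      rfl
    · have hlt : p < PySem.List.pyGetD a i 0 := not_le.mp hle
      simp [pvChain, hlt]
      rfl
  case case3 i j front h x i' j' ih =>
    rw [pvSeq, dif_pos h, ih]
    cases front <;> (simp [pvChain]; try rfl)
  case case4 i j prev front h =>
    rw [pvSeq, dif_neg h]
    cases prev <;> simp [pvChain]

theorem pvChain_eq (l : List Int) : ∀ (prev : Option Int),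
    pvChain prev l = decide (List.IsChain (· < ·) (prev.toList ++ l)) := by
  induction l with
  | nil => intro prev; cases prev <;> simp [pvChain]
  | cons x rest ih =>
    intro prev
    cases prev with
    | none => simp [pvChain, ih (some x)]
    | some p =>
      simp only [pvChain, ih (some x), Option.toList]
      by_cases hpx : p < x
      · simp [hpx, List.isChain_cons_cons]
      · simp [hpx, List.isChain_cons_cons]

theorem nodup_of_len_eq (b : List Int) (h : b.length = (PySem.Set.ofList b).length) :
    b.Nodup := by
  have h1 : (PySem.Set.ofList b : List Int) ⊆ b.dedup := by
    intro x hx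
    rw [List.mem_dedup]
    exact (PySem.Set.mem_ofList b x).mp hx
  have h2 : (PySem.Set.ofList b : List Int).Nodup := PySem.Set.nodup_ofList b
  have h3 := (List.subperm_of_subset h2 h1).length_le
  have h4 := b.dedup_sublist.length_le
  have h5 : b.dedup = b := b.dedup_sublist.eq_of_length (by omega)
  exact List.dedup_eq_self.mp h5

-- A's final check decides "b is strictly increasing"
theorem pvCheck_eq (b : List Int) : pvCheck b = decide (List.IsChain (· < ·) b) := by
  have key : (b.length = (PySem.Set.ofList b).length ∧
      b = PySem.List.sorted b (fun x => x) false) ↔ List.IsChain (· < ·) b := by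
    constructor
    · rintro ⟨h1, h2⟩
      have hnd : b.Nodup := nodup_of_len_eq b h1
      have hle : b.Pairwise (· ≤ ·) := by
        have hp := PySem.List.sorted_pairwise b (fun x => x)
        rw [← h2] at hp
        exact hp
      rw [List.isChain_iff_pairwise]
      refine (List.Pairwise.and hle hnd).imp ?_
      rintro a c ⟨hac, hne⟩
      exact lt_of_le_of_ne hac hne
    · intro hc
      rw [List.isChain_iff_pairwise] at hc
      have hnd : b.Nodup := hc.imp (fun h => ne_of_lt h)
      have hle : b.Pairwise (· ≤ ·) := hc.imp le_of_lt
      refine ⟨?_, (PySem.List.sorted_eq_self_of_pairwise b (fun x => x) hle).symm⟩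
      rw [PySem.Set.ofList_eq_self_of_nodup b hnd]
  unfold pvCheck
  split_ifs with h1 h2
  · simp only [bne_iff_ne, ne_eq] at h1
    have : ¬ List.IsChain (· < ·) b := fun hc => h1 (key.mpr hc).1
    simp [this]
  · simp only [bne_iff_ne, ne_eq, not_not] at h1
    simp only [beq_iff_eq] at h2
    simp [key.mp ⟨h1, h2⟩]
  · simp only [bne_iff_ne, ne_eq, not_not] at h1
    simp only [beq_iff_eq] at h2
    have : ¬ List.IsChain (· < ·) b := fun hc => h2 (key.mpr hc).2
    simp [this]

theorem pvSeq_nil (a : List Int) (i j : Int) (front : Bool) (h : j < i) :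
    pvSeq a i j front = [] := by
  rw [pvSeq]; simp [not_le.mpr h]

theorem pvSeq_single (a : List Int) (i : Int) :
    pvSeq a i i true = [PySem.List.pyGetD a i 0] := by
  rw [pvSeq]; simp [pvSeq_nil a (i + 1) i false (by omega)]

theorem pvSeq_split (a : List Int) (i j : Int) (h : i < j) :
    pvSeq a i j true =
      PySem.List.pyGetD a i 0 :: PySem.List.pyGetD a j 0 :: pvSeq a (i + 1) (j - 1) true := by
  rw [pvSeq]; simp only [le_of_lt h, dif_pos, if_true]
  rw [pvSeq]; simp [show i + 1 ≤ j by omega]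

-- Python a[-c-1] is a[len(a)-1-c] for 0 ≤ c < len(a)
theorem pyGetD_neg_shift (a : List Int) (c : Int) (h0 : 0 ≤ c) (h1 : c < (a.length:Int)) :
    PySem.List.pyGetD a (-c - 1) 0 = PySem.List.pyGetD a ((a.length:Int) - 1 - c) 0 := by
  simp only [PySem.List.pyGetD, PySem.List.pyGet?, PySem.List.pyIdx?]
  rw [if_neg (by omega), if_pos (by omega), if_pos (by omega), if_pos (by omega)]
  have h2 : a.length - (-(-c - 1)).toNat = ((a.length:Int) - 1 - c).toNat := by omega
  rw [h2]

-- even branch: A's b is the two-pointer sequence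
theorem foldl_even (a : List Int) (K : Int) (h2 : 2 * K = (a.length : Int)) :
    ∀ (fuel : Nat) (c : Int) (B : List Int), 0 ≤ c → c + fuel = K →
      (PySem.List.pyRange c K 1).foldl
          (fun b c => b ++ [PySem.List.pyGetD a c 0, PySem.List.pyGetD a (-c - 1) 0]) B
        = B ++ pvSeq a c ((a.length : Int) - 1 - c) true := by
  intro fuel
  induction fuel with
  | zero =>
    intro c B h0 hc
    have hcK : c = K := by omega
    rw [hcK, PySem.List.pyRange_one_eq_nil le_rfl, List.foldl_nil,
      pvSeq_nil _ _ _ _ (by omega), List.append_nil]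
  | succ f ih =>
    intro c B h0 hc
    have hcK : c < K := by omega
    rw [PySem.List.pyRange_one_cons hcK, List.foldl_cons]
    rw [ih (c + 1) _ (by omega) (by omega)]
    rw [pyGetD_neg_shift a c h0 (by omega)]
    rw [pvSeq_split a c _ (by omega),
      show (a.length:Int) - 1 - (c + 1) = (a.length:Int) - 1 - c - 1 by omega]
    simp

-- odd branch, phase 2: once b has length len(a), "del b[len(a)::]" makes each iteration the identity
theorem foldl_full (a : List Int) :
    ∀ (fuel : Nat) (c : Int) (B : List Int), B.length = a.length →
      c + fuel = (a.length : Int) →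
      (PySem.List.pyRange c (a.length : Int) 1).foldl
          (fun b c => (b ++ [PySem.List.pyGetD a c 0, PySem.List.pyGetD a (-c - 1) 0]).take a.length) B
        = B := by
  intro fuel
  induction fuel with
  | zero =>
    intro c B hB hc
    rw [show c = (a.length : Int) by omega, PySem.List.pyRange_one_eq_nil le_rfl, List.foldl_nil]
  | succ f ih =>
    intro c B hB hc
    rw [PySem.List.pyRange_one_cons (by omega), List.foldl_cons]
    have ht : (B ++ [PySem.List.pyGetD a c 0, PySem.List.pyGetD a (-c - 1) 0]).take a.length = B := by
      rw [← hB, List.take_left]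
    rw [ht, ih (c + 1) B hB (by omega)]

-- odd branch, phase 1: while b is not yet full it is the two-pointer sequence
theorem foldl_odd (a : List Int) (K : Int) (h2 : 2 * K + 1 = (a.length : Int)) :
    ∀ (fuel : Nat) (c : Int) (B : List Int), 0 ≤ c → c + fuel = K →
      B.length = (2 * c).toNat →
      (PySem.List.pyRange c (a.length : Int) 1).foldl
          (fun b c => (b ++ [PySem.List.pyGetD a c 0, PySem.List.pyGetD a (-c - 1) 0]).take a.length) B
        = B ++ pvSeq a c ((a.length : Int) - 1 - c) true := by
  intro fuel
  induction fuel with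
  | zero =>
    intro c B h0 hc hB
    have hcK : c = K := by omega
    subst hcK
    rw [PySem.List.pyRange_one_cons (by omega), List.foldl_cons]
    rw [pyGetD_neg_shift a c h0 (by omega)]
    have hmid : (a.length : Int) - 1 - c = c := by omega
    rw [hmid]
    have ht : (B ++ [PySem.List.pyGetD a c 0, PySem.List.pyGetD a c 0]).take a.length
        = B ++ [PySem.List.pyGetD a c 0] := by
      rw [List.take_append, List.take_of_length_le (by omega),
        show a.length - B.length = 1 by omega]
      rfl
    rw [ht, foldl_full a ((a.length : Int) - c - 1).toNat (c + 1) _ (by simp; omega) (by omega),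
      pvSeq_single]
  | succ f ih =>
    intro c B h0 hc hB
    have hcK : c < K := by omega
    rw [PySem.List.pyRange_one_cons (by omega), List.foldl_cons]
    rw [pyGetD_neg_shift a c h0 (by omega)]
    have ht : (B ++ [PySem.List.pyGetD a c 0, PySem.List.pyGetD a ((a.length:Int) - 1 - c) 0]).take a.length
        = B ++ [PySem.List.pyGetD a c 0, PySem.List.pyGetD a ((a.length:Int) - 1 - c) 0] := by
      apply List.take_of_length_le
      simp
      omega
    rw [ht, ih (c + 1) _ (by omega) (by omega) (by simp; omega)]
    rw [pvSeq_split a c _ (by omega),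
      show (a.length:Int) - 1 - (c + 1) = (a.length:Int) - 1 - c - 1 by omega]
    simp

theorem main_eq (a : List Int) : alternatingSort a = alternatingSort_alt a := by
  unfold alternatingSort alternatingSort_alt
  rw [altLoop_eq, pvChain_eq]
  by_cases hpar : ((a.length : Int)) % 2 = 0
  · rw [if_pos (by simpa using hpar)]
    have hfd : PySem.Int.floordiv (a.length : Int) 2 = (a.length : Int) / 2 := by
      simp [PySem.Int.floordiv, Int.fdiv_eq_ediv]
    have h2 : 2 * ((a.length : Int) / 2) = (a.length : Int) := by omega
    rw [hfd, foldl_even a _ h2 ((a.length : Int) / 2).toNat 0 [] le_rfl (by omega)]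
    rw [pvCheck_eq]
    simp
  · rw [if_neg (by simpa using hpar)]
    have h2 : 2 * (((a.length : Int) - 1) / 2) + 1 = (a.length : Int) := by omega
    rw [foldl_odd a _ h2 (((a.length : Int) - 1) / 2).toNat 0 [] le_rfl (by omega) (by simp)]
    rw [pvCheck_eq]
    simp

-- ===== VERDICT (by name: the statement is the Claim_ definition above) =====
theorem alternatingSort_spec : Claim_equal_alternatingSort := by
  intro a _
  unfold Spec_alternatingSort
  exact main_eq a
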